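-- pv_equiv track=rewrite | github.com/paulxiep/invoice-parse | services/processing/invoice_processing/table_extract.py | _detect_gaps
-- ===== SOURCE A (Python) =====
-- def _detect_gaps(values: list[int]) -> list[list[int]]:
--     """Cluster sorted values by detecting natural gaps.
--
--     Computes gaps between consecutive values, uses the median gap as
--     baseline. A gap > 2× median signals a cluster boundary.
--     Returns list of clusters (each a list of original indices).
--     """
--     if len(values) <= 1:
--         return [list(range(len(values)))]
--
--     gaps = [values[i + 1] - values[i] for i in range(len(values) - 1)]
--     median_gap = sorted(gaps)[len(gaps) // 2] if gaps else 0
--     threshold = max(median_gap * 2, 1)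
--
--     clusters: list[list[int]] = [[0]]
--     for i, gap in enumerate(gaps):
--         if gap > threshold:
--             clusters.append([])
--         clusters[-1].append(i + 1)
--     return clusters
-- ===== SOURCE B (Python) =====
-- def _select(xs, k):
--     """k-th smallest element of xs (0-based) by iterative three-way quickselect."""
--     while True:
--         p = xs[0]
--         lt = [x for x in xs if x < p]
--         if k < len(lt):
--             xs = lt
--             continue
--         eq = [x for x in xs if x == p]
--         if k < len(lt) + len(eq):
--             return p
--         k -= len(lt) + len(eq)
--         xs = [x for x in xs if x > p]
--
--
-- def _detect_gaps(values: list[int]) -> list[list[int]]: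
--     n = len(values)
--     if n <= 1:
--         return [list(range(n))]
--     gaps = [values[i + 1] - values[i] for i in range(n - 1)]
--     median_gap = _select(gaps, len(gaps) // 2)
--     threshold = max(median_gap * 2, 1)
--     boundaries = [i + 1 for i, gap in enumerate(gaps) if gap > threshold]
--     cuts = [0] + boundaries + [n]
--     return [list(range(a, b)) for a, b in zip(cuts, cuts[1:])]
-- ===== Notes on version B (the rewrite author's own statement) =====
-- stated objective: alternative
-- what changed: B replaces the full sort of gaps by an iterative three-way quickselect for the median gap, and replaces A's append-to-last-cluster loop by computing the boundary indices and emitting the clusters as ranges between consecutive cuts.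
import Mathlib
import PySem

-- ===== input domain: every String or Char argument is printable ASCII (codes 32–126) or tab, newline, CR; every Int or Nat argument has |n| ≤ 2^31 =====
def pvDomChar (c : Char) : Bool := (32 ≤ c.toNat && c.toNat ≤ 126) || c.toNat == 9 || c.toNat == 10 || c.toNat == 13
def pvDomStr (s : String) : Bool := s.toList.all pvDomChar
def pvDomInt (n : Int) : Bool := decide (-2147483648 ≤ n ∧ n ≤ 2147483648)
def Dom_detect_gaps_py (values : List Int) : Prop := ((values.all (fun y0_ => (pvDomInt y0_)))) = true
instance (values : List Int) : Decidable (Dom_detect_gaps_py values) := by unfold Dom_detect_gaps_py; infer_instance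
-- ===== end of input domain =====

-- B replaces the full sort of the gaps by a three-way quickselect for the median gap and
-- builds the clusters as ranges between cut indices instead of appending to the last cluster
-- (alternative algorithm, same observable result).


-- ===== PORT A =====
-- `clusters[-1].append(v)`: append v to the last list of cl (cl is never [] here)
def pvAppendLast (cl : List (List Int)) (v : Int) : List (List Int) :=
  match cl with
  | [] => []
  | [c] => [c ++ [v]]
  | c :: rest => c :: pvAppendLast rest v

def detect_gaps_py (values : List Int) : List (List Int) :=
  if values.length ≤ 1 then [PySem.List.pyRange 0 values.length 1]
  else
    let gaps := (PySem.List.pyRange 0 ((values.length : Int) - 1) 1).map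
      (fun i => PySem.List.pyGetD values (i + 1) 0 - PySem.List.pyGetD values i 0)
    let median_gap := if gaps = [] then (0 : Int) else
      PySem.List.pyGetD (PySem.List.sorted gaps (fun x => x) false)
        (PySem.Int.floordiv (gaps.length : Int) 2) 0
    let threshold := max (median_gap * 2) 1
    (PySem.List.enumerate gaps 0).foldl
      (fun cl ig => pvAppendLast (if threshold < ig.2 then cl ++ [[]] else cl) (ig.1 + 1))
      [[0]]

-- ===== PORT B =====
-- iterative three-way quickselect: k-th smallest of xs (xs nonempty, k < |xs| at every call)
def pvSelect (xs : List Int) (k : Nat) : Int :=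
  match xs with
  | [] => 0
  | p :: rest =>
    let lt := (p :: rest).filter (fun x => x < p)
    if k < lt.length then pvSelect lt k
    else
      let eq := (p :: rest).filter (fun x => x == p)
      if k < lt.length + eq.length then p
      else pvSelect ((p :: rest).filter (fun x => p < x)) (k - (lt.length + eq.length))
termination_by xs.length
decreasing_by
  · exact List.length_filter_lt_length_iff_exists.2 ⟨p, List.mem_cons_self .., by simp⟩
  · exact List.length_filter_lt_length_iff_exists.2 ⟨p, List.mem_cons_self .., by simp⟩

def detect_gaps_py_alt (values : List Int) : List (List Int) :=
  if values.length ≤ 1 then [PySem.List.pyRange 0 values.length 1]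
  else
    let gaps := (PySem.List.pyRange 0 ((values.length : Int) - 1) 1).map
      (fun i => PySem.List.pyGetD values (i + 1) 0 - PySem.List.pyGetD values i 0)
    let median_gap := pvSelect gaps (gaps.length / 2)
    let threshold := max (median_gap * 2) 1
    let boundaries := ((PySem.List.enumerate gaps 0).filter
      (fun ig => threshold < ig.2)).map (fun ig => ig.1 + 1)
    let cuts := [(0 : Int)] ++ boundaries ++ [(values.length : Int)]
    (cuts.zip cuts.tail).map (fun ab => PySem.List.pyRange ab.1 ab.2 1)

-- ===== PRECONDITION & SPEC =====
def Spec_detect_gaps_py (values : List Int) (out : List (List Int)) : Prop := out = detect_gaps_py_alt values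
instance (values : List Int) (out : List (List Int)) : Decidable (Spec_detect_gaps_py values out) := by unfold Spec_detect_gaps_py; infer_instance

-- ===== CLAIM (what is proved, stated in full; the proofs are below) =====
def Claim_equal_detect_gaps_py : Prop := ∀ (values : List Int), Dom_detect_gaps_py values → Spec_detect_gaps_py values (detect_gaps_py values)

-- ===== LEMMAS AND PROOFS =====

-- canonical cluster builder: current cluster `cur`, remaining (index, gap) pairs
def pvG (t : Int) (cur : List Int) : List (Int × Int) → List (List Int)
  | [] => [cur]
  | ig :: rest => if t < ig.2 then cur :: pvG t [ig.1 + 1] rest else pvG t (cur ++ [ig.1 + 1]) rest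

-- canonical cluster list from last cut c, interior boundaries bs, end n
def pvBRec (c : Int) : List Int → Int → List (List Int)
  | [], n => [PySem.List.pyRange c n 1]
  | b :: bs, n => PySem.List.pyRange c b 1 :: pvBRec b bs n

-- boundary indices of gaps whose first pair has index j
def pvBnds (t j : Int) : List Int → List Int
  | [] => []
  | g :: r => if t < g then (j + 1) :: pvBnds t (j + 1) r else pvBnds t (j + 1) r

theorem pvAppendLast_acc (acc : List (List Int)) (cur : List Int) (v : Int) :
    pvAppendLast (acc ++ [cur]) v = acc ++ [cur ++ [v]] := by
  induction acc with
  | nil => rfl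
  | cons a acc ih =>
    cases acc with
    | nil => simp [pvAppendLast]
    | cons b acc => simpa [pvAppendLast] using ih

theorem pvFoldA_eq_G (t : Int) (l : List (Int × Int)) :
    ∀ (acc : List (List Int)) (cur : List Int),
    l.foldl (fun cl ig => pvAppendLast (if t < ig.2 then cl ++ [[]] else cl) (ig.1 + 1)) (acc ++ [cur])
      = acc ++ pvG t cur l := by
  induction l with
  | nil => intro acc cur; simp [pvG]
  | cons ig rest ih =>
    intro acc cur
    by_cases h : t < ig.2
    · simp only [List.foldl_cons, if_pos h]
      rw [show acc ++ [cur] ++ [([] : List Int)] = (acc ++ [cur]) ++ [([] : List Int)] by simp,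
        pvAppendLast_acc (acc ++ [cur]) [] (ig.1 + 1), List.nil_append,
        ih (acc ++ [cur]) [ig.1 + 1]]
      simp [pvG, h]
    · simp only [List.foldl_cons, if_neg h, pvAppendLast_acc, ih, pvG]

theorem pvZip_eq_BRec (bs : List Int) : ∀ (c n : Int),
    (((c :: (bs ++ [n])).zip (bs ++ [n])).map (fun ab => PySem.List.pyRange ab.1 ab.2 1))
      = pvBRec c bs n := by
  induction bs with
  | nil => intro c n; simp [pvBRec]
  | cons b bs ih => intro c n; simp only [List.cons_append, List.zip_cons_cons, List.map_cons, pvBRec, ih]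

theorem pvBoundaries_eq_bnds (t : Int) (gs : List Int) : ∀ (j : Int),
    ((PySem.List.enumerate gs j).filter (fun ig => t < ig.2)).map (fun ig => ig.1 + 1)
      = pvBnds t j gs := by
  induction gs with
  | nil => intro j; simp [PySem.List.enumerate_nil, pvBnds]
  | cons g r ih =>
    intro j
    rw [PySem.List.enumerate_cons]
    by_cases h : t < g <;> simp [pvBnds, h, ih]

theorem pvKey (t : Int) (gs : List Int) : ∀ (j c : Int), c ≤ j →
    pvG t (PySem.List.pyRange c (j + 1) 1) (PySem.List.enumerate gs j)
      = pvBRec c (pvBnds t j gs) (j + 1 + gs.length) := by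
  induction gs with
  | nil => intro j c _; simp [PySem.List.enumerate_nil, pvG, pvBnds, pvBRec]
  | cons g r ih =>
    intro j c hc
    rw [PySem.List.enumerate_cons]
    by_cases h : t < g
    · simp only [pvG, if_pos h, pvBnds, pvBRec]
      rw [show [(j : Int) + 1] = PySem.List.pyRange (j + 1) ((j + 1) + 1) 1 by simp [pysem],
        ih (j + 1) (j + 1) le_rfl]
      congr 2
      push_cast [List.length_cons]; ring
    · simp only [pvG, if_neg h, pvBnds]
      rw [show PySem.List.pyRange c (j + 1) 1 ++ [(j : Int) + 1]
            = PySem.List.pyRange c ((j + 1) + 1) 1 from (PySem.List.pyRange_one_succ_right (by omega)).symm,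
        ih (j + 1) c (by omega)]
      congr 1
      push_cast [List.length_cons]; ring

theorem pvPartPerm (xs : List Int) (p : Int) :
    (xs.filter (fun x => x < p) ++ (xs.filter (fun x => x == p) ++ xs.filter (fun x => p < x))).Perm xs := by
  have h1 := List.filter_append_perm (fun x => decide (x < p)) xs
  have h2 := List.filter_append_perm (fun x => x == p) (xs.filter (fun x => !decide (x < p)))
  rw [List.filter_filter, List.filter_filter] at h2
  have e1 : xs.filter (fun x => x == p && !decide (x < p)) = xs.filter (fun x => x == p) := by
    apply List.filter_congr; intro x _
    by_cases hx : x = p <;> simp [hx]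
  have e2 : xs.filter (fun x => !(x == p) && !decide (x < p)) = xs.filter (fun x => p < x) := by
    apply List.filter_congr; intro x _
    rcases lt_trichotomy x p with h|h|h
    · simp [h, not_lt.2 h.le]
    · simp [h]
    · simp [h, h.ne', not_lt.2 h.le]
  rw [e1, e2] at h2
  exact ((List.Perm.append_left _ h2).trans h1)

theorem pvSortedSplit (xs : List Int) (p : Int) :
    PySem.List.sorted xs (fun x => x) false
      = PySem.List.sorted (xs.filter (fun x => x < p)) (fun x => x) false
        ++ (xs.filter (fun x => x == p)
        ++ PySem.List.sorted (xs.filter (fun x => p < x)) (fun x => x) false) := by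
  apply PySem.List.sorted_id_eq_of_perm_of_pairwise
  · exact ((PySem.List.sorted_perm _ _ _).append
      ((List.Perm.refl _).append (PySem.List.sorted_perm _ _ _))).trans (pvPartPerm xs p)
  · rw [List.pairwise_append, List.pairwise_append]
    refine ⟨PySem.List.sorted_pairwise _ _, ⟨?_, PySem.List.sorted_pairwise _ _, ?_⟩, ?_⟩
    · apply List.pairwise_of_forall_mem_list
      intro a ha b hb
      simp only [List.mem_filter, beq_iff_eq] at ha hb
      omega
    · intro a ha b hb
      have ha' : a ∈ xs.filter (fun x => x == p) := ha
      have hb' : b ∈ xs.filter (fun x => p < x) := (PySem.List.mem_sorted _ _ _ _).1 hb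
      simp only [List.mem_filter, beq_iff_eq, decide_eq_true_eq] at ha' hb'
      omega
    · intro a ha b hb
      have ha' : a ∈ xs.filter (fun x => x < p) := (PySem.List.mem_sorted _ _ _ _).1 ha
      simp only [List.mem_filter, decide_eq_true_eq] at ha'
      rcases List.mem_append.1 hb with hb | hb
      · have : b ∈ xs.filter (fun x => x == p) := hb
        simp only [List.mem_filter, beq_iff_eq] at this
        omega
      · have : b ∈ xs.filter (fun x => p < x) := (PySem.List.mem_sorted _ _ _ _).1 hb
        simp only [List.mem_filter, decide_eq_true_eq] at this
        omega

theorem pvFilterLen (p : Int) (rest : List Int) (q : Int → Bool) (hq : q p = false) :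
    ((p :: rest).filter q).length < (p :: rest).length :=
  List.length_filter_lt_length_iff_exists.2 ⟨p, List.mem_cons_self .., by simp [hq]⟩

theorem pvSelect_eq_sorted : ∀ (m : Nat) (xs : List Int), xs.length ≤ m → ∀ (k : Nat), k < xs.length →
    pvSelect xs k = (PySem.List.sorted xs (fun x => x) false).getD k 0 := by
  intro m
  induction m with
  | zero => intro xs h k hk; omega
  | succ m ih =>
    intro xs hxs k hk
    match xs with
    | [] => simp at hk
    | p :: rest =>
      have hlen : ((p :: rest).filter (fun x => x < p)).length
          + (((p :: rest).filter (fun x => x == p)).length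
          + ((p :: rest).filter (fun x => p < x)).length) = (p :: rest).length := by
        have h := (pvPartPerm (p :: rest) p).length_eq
        simp only [List.length_append] at h
        omega
      have hLlt := pvFilterLen p rest (fun x => decide (x < p)) (by simp)
      have hGlt := pvFilterLen p rest (fun x => decide (p < x)) (by simp)
      rw [pvSelect]
      simp only []
      by_cases h1 : k < ((p :: rest).filter (fun x => x < p)).length
      · rw [if_pos h1, pvSortedSplit (p :: rest) p,
          List.getD_append _ _ _ _ (by rw [PySem.List.length_sorted]; exact h1)]
        exact ih _ (by omega) k h1
      · rw [if_neg h1]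
        by_cases h2 : k < ((p :: rest).filter (fun x => x < p)).length
            + ((p :: rest).filter (fun x => x == p)).length
        · rw [if_pos h2, pvSortedSplit (p :: rest) p,
            List.getD_append_right _ _ _ _ (by rw [PySem.List.length_sorted]; omega),
            PySem.List.length_sorted,
            List.getD_append _ _ _ _ (by omega),
            List.getD_eq_getElem _ _ (by omega)]
          have hm : ((p :: rest).filter (fun x => x == p))[k - ((p :: rest).filter (fun x => x < p)).length]'(by omega) ∈ (p :: rest).filter (fun x => x == p) := List.getElem_mem _
          simp only [List.mem_filter, beq_iff_eq] at hm
          exact hm.2.symm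
        · rw [if_neg h2, pvSortedSplit (p :: rest) p,
            List.getD_append_right _ _ _ _ (by rw [PySem.List.length_sorted]; omega),
            PySem.List.length_sorted,
            List.getD_append_right _ _ _ _ (by omega)]
          rw [show k - ((p :: rest).filter (fun x => x < p)).length
              - ((p :: rest).filter (fun x => x == p)).length
              = k - (((p :: rest).filter (fun x => x < p)).length
                + ((p :: rest).filter (fun x => x == p)).length) by omega]
          exact ih _ (by omega) _ (by omega)

-- ===== VERDICT (by name: the statement is the Claim_ definition above) =====
theorem detect_gaps_py_spec : Claim_equal_detect_gaps_py := by
  intro values _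
  unfold Spec_detect_gaps_py detect_gaps_py detect_gaps_py_alt
  by_cases hv : values.length ≤ 1
  · rw [if_pos hv, if_pos hv]
  · rw [if_neg hv, if_neg hv]
    dsimp only
    set gaps := (PySem.List.pyRange 0 ((values.length : Int) - 1) 1).map
      (fun i => PySem.List.pyGetD values (i + 1) 0 - PySem.List.pyGetD values i 0) with hgaps
    have hglen : gaps.length = values.length - 1 := by
      rw [hgaps, List.length_map, PySem.List.length_pyRange_one]
      omega
    have hgne : gaps ≠ [] := by
      intro h
      rw [h] at hglen
      simp at hglen
      omega
    have hmed : (if gaps = [] then (0 : Int) else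
        PySem.List.pyGetD (PySem.List.sorted gaps (fun x => x) false)
          (PySem.Int.floordiv (gaps.length : Int) 2) 0)
        = pvSelect gaps (gaps.length / 2) := by
      rw [if_neg hgne,
        show PySem.Int.floordiv (gaps.length : Int) 2 = ((gaps.length / 2 : Nat) : Int) by
          exact_mod_cast PySem.Int.floordiv_natCast gaps.length 2,
        PySem.List.pyGetD_natCast,
        pvSelect_eq_sorted gaps.length gaps le_rfl (gaps.length / 2) (by omega)]
    rw [hmed]
    rw [show ([[0]] : List (List Int)) = [] ++ [[0]] from rfl,
      pvFoldA_eq_G (max (pvSelect gaps (gaps.length / 2) * 2) 1) (PySem.List.enumerate gaps 0) [] [0],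
      List.nil_append,
      show ([0] : List Int) = PySem.List.pyRange 0 (0 + 1) 1 by decide,
      pvKey (max (pvSelect gaps (gaps.length / 2) * 2) 1) gaps 0 0 le_rfl]
    rw [show PySem.List.pyRange (0 : Int) (0 + 1) 1 = ([0] : List Int) by decide]
    simp only [List.cons_append, List.nil_append]
    rw [List.tail_cons, pvZip_eq_BRec, pvBoundaries_eq_bnds]
    congr 1
    push_cast
    omega
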